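-- pv_equiv track=rewrite | github.com/gobbleyourdong/open_problems | math/poincare_conjecture/numerics/real_world_domains.py | packing_find
-- ===== SOURCE A (Python) =====
-- from itertools import permutations, product as iprod
--
-- def packing_find(items, capacity, n_bins):
--     n = len(items)
--     if n > 15: return None
--     for assign in iprod(range(n_bins), repeat=n):
--         loads = [0] * n_bins
--         valid = True
--         for item, b in zip(items, assign):
--             loads[b] += item
--             if loads[b] > capacity:
--                 valid = False
--                 break
--         if valid:
--             return list(assign)
--     return None
-- ===== SOURCE B (Python) =====
-- def packing_find(items, capacity, n_bins):
--     n = len(items)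
--     if n > 15:
--         return None
--     loads = [0] * n_bins
--     assign = []
--
--     def dfs(i):
--         if i == n:
--             return True
--         for b in range(n_bins):
--             v = loads[b] + items[i]
--             if v <= capacity:
--                 old = loads[b]
--                 loads[b] = v
--                 assign.append(b)
--                 if dfs(i + 1):
--                     return True
--                 assign.pop()
--                 loads[b] = old
--         return False
--
--     return assign if dfs(0) else None
-- ===== Notes on version B (the rewrite author's own statement) =====
-- stated objective: alternative
-- what changed: Replaced A's exhaustive enumeration of all n_bins^n assignments (each re-checked from scratch) with a backtracking DFS that maintains running bin loads and prunes any prefix whose bin already overflows capacity.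
import Mathlib
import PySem

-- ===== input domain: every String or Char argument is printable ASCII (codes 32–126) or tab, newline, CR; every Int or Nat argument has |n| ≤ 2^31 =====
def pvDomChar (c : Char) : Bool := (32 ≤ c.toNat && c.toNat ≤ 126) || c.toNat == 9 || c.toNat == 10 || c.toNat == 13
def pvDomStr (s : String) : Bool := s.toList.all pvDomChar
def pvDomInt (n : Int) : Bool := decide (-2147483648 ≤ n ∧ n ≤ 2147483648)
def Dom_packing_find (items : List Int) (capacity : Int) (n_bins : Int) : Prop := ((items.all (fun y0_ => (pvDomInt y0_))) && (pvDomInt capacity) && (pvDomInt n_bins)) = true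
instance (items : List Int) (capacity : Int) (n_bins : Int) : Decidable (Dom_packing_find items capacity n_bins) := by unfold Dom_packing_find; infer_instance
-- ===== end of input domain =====

-- B replaces A's full enumeration of all n_bins^n assignments with a backtracking
-- DFS that prunes any prefix whose bin load already exceeds capacity (alternative algorithm).

-- ===== PORT A =====
-- A's inner validity loop: add each item to its bin, bail out (none) as soon as a
-- load exceeds capacity; returns the final loads on success (A's `valid` flag = isSome).
def chkA (capacity : Int) : List (Int × Nat) → List Int → Option (List Int)
  | [], loads => some loads
  | (item, b) :: rest, loads =>
      let v := loads.getD b 0 + item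
      if v > capacity then none else chkA capacity rest (loads.set b v)

-- A's outer loop: itertools.product(range(n_bins), repeat=n) in lexicographic order,
-- generated depth-first (k items still to choose, acc = chosen prefix); each complete
-- assignment is checked from scratch with chkA, exactly as A does.
def goA (items : List Int) (capacity : Int) (nb : Nat) : Nat → List Nat → Option (List Nat)
  | 0, acc =>
      if (chkA capacity (items.zip acc) (List.replicate nb 0)).isSome then some acc else none
  | k + 1, acc =>
      (List.range nb).findSome? (fun b => goA items capacity nb k (acc ++ [b]))

def packing_find (items : List Int) (capacity : Int) (n_bins : Int) : Option (List Int) :=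
  let n := items.length
  if n > 15 then none
  else (goA items capacity n_bins.toNat n []).map (List.map Int.ofNat)

-- ===== PORT B =====
-- B's recursive DFS: assign the next item to each bin in order, skipping (pruning)
-- any bin whose new load would exceed capacity; loads is the running state.
def dfsB (capacity : Int) (nb : Nat) : List Int → List Int → Option (List Nat)
  | [], _ => some []
  | item :: rest, loads =>
      (List.range nb).findSome? (fun b =>
        let v := loads.getD b 0 + item
        if v ≤ capacity then (dfsB capacity nb rest (loads.set b v)).map (b :: ·) else none)

def packing_find_alt (items : List Int) (capacity : Int) (n_bins : Int) : Option (List Int) :=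
  if items.length > 15 then none
  else (dfsB capacity n_bins.toNat items (List.replicate n_bins.toNat 0)).map (List.map Int.ofNat)

-- ===== PRECONDITION & SPEC =====
def Spec_packing_find (items : List Int) (capacity : Int) (n_bins : Int) (out : Option (List Int)) : Prop := out = packing_find_alt items capacity n_bins
instance (items : List Int) (capacity : Int) (n_bins : Int) (out : Option (List Int)) : Decidable (Spec_packing_find items capacity n_bins out) := by unfold Spec_packing_find; infer_instance

-- ===== CLAIM (what is proved, stated in full; the proofs are below) =====
def Claim_equal_packing_find : Prop := ∀ (items : List Int) (capacity : Int) (n_bins : Int), Dom_packing_find items capacity n_bins → Spec_packing_find items capacity n_bins (packing_find items capacity n_bins)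

-- ===== LEMMAS AND PROOFS =====

theorem chkA_append (capacity : Int) (xs ys : List (Int × Nat)) (loads : List Int) :
    chkA capacity (xs ++ ys) loads = (chkA capacity xs loads).bind (chkA capacity ys) := by
  induction xs generalizing loads with
  | nil => simp [chkA]
  | cons p rest ih =>
      obtain ⟨item, b⟩ := p
      simp only [List.cons_append, chkA]
      split <;> simp [ih]

theorem findSome?_map_of_eq {α β γ : Type} (l : List α) (f : α → Option β) (g : α → Option γ)
    (h : γ → β) (hfg : ∀ a ∈ l, f a = (g a).map h) :
    l.findSome? f = (l.findSome? g).map h := by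
  induction l with
  | nil => simp
  | cons a t ih =>
      simp only [List.findSome?]
      rw [hfg a (by simp)]
      cases g a with
      | none => simpa using ih (fun x hx => hfg x (by simp [hx]))
      | some v => simp

-- If the chosen prefix is already invalid, A finds nothing among its extensions.
theorem goA_none (items : List Int) (capacity : Int) (nb : Nat) (k : Nat) (acc : List Nat)
    (hlen : acc.length + k = items.length)
    (hchk : chkA capacity ((items.take acc.length).zip acc) (List.replicate nb 0) = none) :
    goA items capacity nb k acc = none := by
  induction k generalizing acc with
  | zero =>
      have : acc.length = items.length := by omega
      rw [this] at hchk
      simp only [goA, List.take_length] at hchk ⊢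
      simp [hchk]
  | succ k ih =>
      simp only [goA]
      apply List.findSome?_eq_none_iff.mpr
      intro b _
      apply ih
      · simp; omega
      · have hlt : acc.length < items.length := by omega
        have htake : items.take (acc.length + 1) = items.take acc.length ++ [items[acc.length]] := by
          rw [List.take_add_one]
          simp [List.getElem?_eq_getElem hlt]
        have hziplen : (items.take acc.length).length = acc.length := by
          simp [Nat.le_of_lt hlt]
        calc chkA capacity ((items.take (acc ++ [b]).length).zip (acc ++ [b])) (List.replicate nb 0)
            = chkA capacity (((items.take acc.length).zip acc) ++ [(items[acc.length], b)]) (List.replicate nb 0) := by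
              simp only [List.length_append, List.length_cons, List.length_nil]
              rw [htake, List.zip_append (by simp [hziplen])]
              simp [List.zip]
          _ = none := by rw [chkA_append, hchk]; rfl

-- Main invariant: on a valid prefix with loads L, A's remaining enumeration equals
-- B's pruned DFS on the remaining items, with the prefix glued back on.
theorem goA_eq_dfsB (items : List Int) (capacity : Int) (nb : Nat) (k : Nat) (acc : List Nat)
    (L : List Int) (hlen : acc.length + k = items.length)
    (hchk : chkA capacity ((items.take acc.length).zip acc) (List.replicate nb 0) = some L) :
    goA items capacity nb k acc = (dfsB capacity nb (items.drop acc.length) L).map (acc ++ ·) := by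
  induction k generalizing acc L with
  | zero =>
      have heq : acc.length = items.length := by omega
      rw [heq] at hchk
      simp only [goA, List.take_length] at hchk ⊢
      rw [heq, List.drop_length]
      simp [hchk, dfsB]
  | succ k ih =>
      have hlt : acc.length < items.length := by omega
      have hdrop : items.drop acc.length = items[acc.length] :: items.drop (acc.length + 1) :=
        List.drop_eq_getElem_cons hlt
      simp only [goA]
      rw [hdrop]
      simp only [dfsB]
      apply findSome?_map_of_eq
      intro b _
      have htake : items.take (acc.length + 1) = items.take acc.length ++ [items[acc.length]] := by
        rw [List.take_add_one]
        simp [List.getElem?_eq_getElem hlt]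
      have hziplen : (items.take acc.length).length = acc.length := by
        simp [Nat.le_of_lt hlt]
      have hchk' : chkA capacity ((items.take (acc ++ [b]).length).zip (acc ++ [b])) (List.replicate nb 0)
          = if L.getD b 0 + items[acc.length] > capacity then none
            else some (L.set b (L.getD b 0 + items[acc.length])) := by
        have : (items.take (acc ++ [b]).length).zip (acc ++ [b])
            = ((items.take acc.length).zip acc) ++ [(items[acc.length], b)] := by
          simp only [List.length_append, List.length_cons, List.length_nil]
          rw [htake, List.zip_append (by simp [hziplen])]
          simp [List.zip]
        rw [this, chkA_append, hchk]
        simp only [Option.bind_some, chkA]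
      by_cases hcap : L.getD b 0 + items[acc.length] ≤ capacity
      · have hc2 : ¬ (L.getD b 0 + items[acc.length] > capacity) := by omega
        rw [if_neg hc2] at hchk'
        rw [ih (acc ++ [b]) _ (by simp; omega) hchk']
        simp only [List.length_append, List.length_cons, List.length_nil, Nat.zero_add]
        rw [if_pos hcap, Option.map_map]
        congr 1
        funext r
        simp
      · have hc2 : L.getD b 0 + items[acc.length] > capacity := by omega
        rw [if_pos hc2] at hchk'
        rw [goA_none items capacity nb k (acc ++ [b]) (by simp; omega) hchk']
        rw [if_neg hcap]
        simp

-- ===== VERDICT (by name: the statement is the Claim_ definition above) =====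
theorem packing_find_spec : Claim_equal_packing_find := by
  intro items capacity n_bins _
  unfold Spec_packing_find packing_find packing_find_alt
  by_cases h : items.length > 15
  · simp [h]
  · simp only [h, if_false]
    have := goA_eq_dfsB items capacity n_bins.toNat items.length []
      (List.replicate n_bins.toNat 0) (by simp) (by simp [chkA])
    rw [this]
    simp
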